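-- pv_equiv track=rewrite | github.com/Greviansonula/pokergame | backend/app/services/poker_engine.py | _is_board_cards
-- ===== SOURCE A (Python) =====
-- def _is_board_cards(action: str) -> bool:
--     """Check if action represents board cards"""
--     # Board cards should be even length and contain valid card representations
--     if len(action) % 2 != 0:
--         return False
--
--     # Check if it looks like cards (alternating ranks and suits)
--     for i in range(0, len(action), 2):
--         if i + 1 >= len(action):
--             return False
--         rank = action[i]
--         suit = action[i + 1]
--         if rank not in '23456789TJQKA' or suit not in 'cdhs':
--             return False
--
--     return True
-- ===== SOURCE B (Python) =====
-- def _is_board_cards(action: str) -> bool: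
--     """Check if action represents board cards"""
--     if len(action) % 2 != 0:
--         return False
--     # ranks at even positions, suits at odd positions: two subset tests
--     return set(action[0::2]) <= set('23456789TJQKA') and set(action[1::2]) <= set('cdhs')
-- ===== Notes on version B (the rewrite author's own statement) =====
-- stated objective: simpler
-- what changed: Replaces the pair-by-pair index loop with its per-iteration bounds check by two stride-2 slices (even positions = ranks, odd positions = suits) validated with two subset tests over the allowed alphabets.
import Mathlib
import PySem

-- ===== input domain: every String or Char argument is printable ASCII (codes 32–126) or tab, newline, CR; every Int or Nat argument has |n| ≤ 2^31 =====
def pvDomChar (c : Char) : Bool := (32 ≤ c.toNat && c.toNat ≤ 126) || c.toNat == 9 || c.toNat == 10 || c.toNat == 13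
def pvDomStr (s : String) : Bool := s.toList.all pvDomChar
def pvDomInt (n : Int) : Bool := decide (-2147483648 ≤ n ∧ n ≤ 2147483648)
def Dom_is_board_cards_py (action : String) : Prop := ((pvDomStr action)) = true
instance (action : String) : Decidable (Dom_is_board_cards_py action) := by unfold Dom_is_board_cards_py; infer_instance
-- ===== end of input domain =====

-- B replaces A's pair-by-pair index loop (with its bounds check) by two stride-2 slices
-- checked as subset tests over the rank/suit alphabets; objective: simpler.


-- ===== PORT A =====
-- 'rank in "23456789TJQKA"' where rank is one character: membership of that character
def pvRankOk (c : Char) : Bool := "23456789TJQKA".toList.contains c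
def pvSuitOk (c : Char) : Bool := "cdhs".toList.contains c

-- the 'for i in range(0, len(action), 2)' loop with its early returns, as recursion
-- over the index list; action[i] / action[i+1] via pyGetD (exact: the guard ensures
-- 0 ≤ i, i+1 < len, so Python never raises here)
def pvLoopA (cs : List Char) : List Int → Bool
  | [] => true
  | i :: rest =>
    if i + 1 ≥ (cs.length : Int) then false
    else
      let rank := PySem.List.pyGetD cs i ' '
      let suit := PySem.List.pyGetD cs (i + 1) ' '
      if ¬ pvRankOk rank ∨ ¬ pvSuitOk suit then false
      else pvLoopA cs rest

def is_board_cards_py (action : String) : Bool :=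
  let cs := action.toList
  if cs.length % 2 ≠ 0 then false
  else pvLoopA cs (PySem.List.pyRange 0 (cs.length : Int) 2)

-- ===== PORT B =====
-- stride-2 slice xs[0::2] (for xs[1::2] apply to xs.drop 1)
def pvEveryOther : List Char → List Char
  | [] => []
  | [c] => [c]
  | c :: _ :: rest => c :: pvEveryOther rest

-- set(ranks) <= set('23456789TJQKA'): every char of the slice is in the alphabet
def is_board_cards_py_alt (action : String) : Bool :=
  let cs := action.toList
  if cs.length % 2 ≠ 0 then false
  else (pvEveryOther cs).all pvRankOk && (pvEveryOther (cs.drop 1)).all pvSuitOk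

-- ===== PRECONDITION & SPEC =====
def Spec_is_board_cards_py (action : String) (out : Bool) : Prop := out = is_board_cards_py_alt action
instance (action : String) (out : Bool) : Decidable (Spec_is_board_cards_py action out) := by unfold Spec_is_board_cards_py; infer_instance

-- ===== CLAIM (what is proved, stated in full; the proofs are below) =====
def Claim_equal_is_board_cards_py : Prop := ∀ (action : String), Dom_is_board_cards_py action → Spec_is_board_cards_py action (is_board_cards_py action)

-- ===== LEMMAS AND PROOFS =====

lemma pvEveryOther_cons (c : Char) (r : List Char) :
    pvEveryOther (c :: r) = c :: pvEveryOther (r.drop 1) := by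
  cases r <;> simp [pvEveryOther]

lemma pvLoopA_key (n : Nat) : ∀ (pre cs : List Char), cs.length = 2 * n →
    pvLoopA (pre ++ cs) ((List.range n).map (fun k : Nat => (pre.length : Int) + 2 * (k : Int))) =
      ((pvEveryOther cs).all pvRankOk && (pvEveryOther (cs.drop 1)).all pvSuitOk) := by
  induction n with
  | zero =>
    intro pre cs h
    have : cs = [] := List.eq_nil_of_length_eq_zero (by omega)
    subst this
    simp [pvLoopA, pvEveryOther]
  | succ n ih =>
    intro pre cs h
    match cs, h with
    | a :: b :: rest, h =>
      have hrest : rest.length = 2 * n := by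
        simp only [List.length_cons] at h; omega
      have hrange : (List.range (n + 1)).map (fun k : Nat => (pre.length : Int) + 2 * (k : Int)) =
          (pre.length : Int) :: (List.range n).map (fun k : Nat => ((pre ++ [a, b]).length : Int) + 2 * (k : Int)) := by
        rw [List.range_succ_eq_map, List.map_cons, List.map_map]
        refine congrArg₂ List.cons (by push_cast; ring) (List.map_congr_left ?_)
        intro k _
        simp only [Function.comp_apply, List.length_append, List.length_cons, List.length_nil]
        push_cast
        ring
      rw [hrange, pvLoopA]
      have hlen : ¬ ((pre.length : Int) + 1 ≥ ((pre ++ a :: b :: rest).length : Int)) := by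
        simp only [List.length_append, List.length_cons]
        push_cast
        omega
      rw [if_neg hlen]
      have hga' : PySem.List.pyGet? (pre ++ a :: b :: rest) (pre.length : Int) = some a :=
        PySem.List.pyGet?_append_length pre (b :: rest) a
      have hgb' : PySem.List.pyGet? (pre ++ a :: b :: rest) ((pre.length : Int) + 1) = some b := by
        have h1 : ((pre.length : Int) + 1) = (((pre ++ [a]).length : Nat) : Int) := by simp
        rw [h1, show pre ++ a :: b :: rest = (pre ++ [a]) ++ b :: rest from by simp]
        exact PySem.List.pyGet?_append_length (pre ++ [a]) rest b
      have hga : PySem.List.pyGetD (pre ++ a :: b :: rest) (pre.length : Int) ' ' = a := by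
        rw [PySem.List.pyGetD, hga']; rfl
      have hgb : PySem.List.pyGetD (pre ++ a :: b :: rest) ((pre.length : Int) + 1) ' ' = b := by
        rw [PySem.List.pyGetD, hgb']; rfl
      rw [hga, hgb]
      by_cases hok : ¬ pvRankOk a ∨ ¬ pvSuitOk b
      · rw [if_pos hok]
        rcases hok with hr | hs
        · simp [pvEveryOther_cons, List.all_cons, Bool.eq_false_iff.mpr hr]
        · simp [pvEveryOther_cons, List.all_cons, Bool.eq_false_iff.mpr hs]
      · rw [if_neg hok]
        push Not at hok
        rw [show pre ++ a :: b :: rest = (pre ++ [a, b]) ++ rest from by simp,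
            ih (pre ++ [a, b]) rest hrest]
        simp [pvEveryOther_cons, List.all_cons, hok.1, hok.2, List.drop_one]

-- ===== VERDICT (by name: the statement is the Claim_ definition above) =====
theorem is_board_cards_py_spec : Claim_equal_is_board_cards_py := by
  intro action _
  unfold Spec_is_board_cards_py is_board_cards_py is_board_cards_py_alt
  set cs := action.toList with hcs
  by_cases hodd : cs.length % 2 ≠ 0
  · simp [hodd]
  · push Not at hodd
    simp only [hodd]
    obtain ⟨n, hn⟩ : ∃ n, cs.length = 2 * n := ⟨cs.length / 2, by omega⟩
    have hr : PySem.List.pyRange 0 (cs.length : Int) 2 =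
        (List.range n).map (fun k : Nat => ((([] : List Char).length : Int) + 2 * (k : Int))) := by
      rw [PySem.List.pyRange_of_pos 0 (cs.length : Int) (by norm_num)]
      rcases Nat.eq_zero_or_pos n with h0 | hpos
      · subst h0
        have hc0 : cs.length = 0 := by omega
        simp [hc0]
      · have hlt : (0 : Int) < (cs.length : Int) := by
          have : 0 < cs.length := by omega
          exact_mod_cast this
        rw [if_pos hlt]
        have hcount : (((cs.length : Int) - 0 + 2 - 1) / 2).toNat = n := by
          rw [hn]; push_cast; omega
        rw [hcount]
        refine List.map_congr_left ?_
        intro k _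
        simp
    rw [hr]
    have := pvLoopA_key n [] cs hn
    simp only [List.nil_append] at this
    rw [this]
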